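-- pv_equiv track=rewrite | github.com/Zeqiang-Lai/Prosody_Prediction | core/inference/wrapper.py | concate
-- ===== SOURCE A (Python) =====
-- def concate(words, tags):
--     assert len(words) == len(tags)
--     s = ''
--     for i in range(len(tags)):
--         if tags[i] == 'B' and i != 0:
--             s += "%"
--         s += words[i]
--     return s
-- ===== SOURCE B (Python) =====
-- def concate(words, tags):
--     assert len(words) == len(tags)
--     groups = []
--     for w, t in zip(words, tags):
--         if not groups or t == 'B':
--             groups.append([w])
--         else:
--             groups[-1].append(w)
--     return '%'.join(''.join(g) for g in groups)
-- ===== Notes on version B (the rewrite author's own statement) =====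
-- stated objective: alternative
-- what changed: B builds the list of '%'-separated groups (a new group at each 'B' tag or at the start) and joins them, instead of A's index loop that conditionally prepends '%' before each word while accumulating one string.
import Mathlib
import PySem

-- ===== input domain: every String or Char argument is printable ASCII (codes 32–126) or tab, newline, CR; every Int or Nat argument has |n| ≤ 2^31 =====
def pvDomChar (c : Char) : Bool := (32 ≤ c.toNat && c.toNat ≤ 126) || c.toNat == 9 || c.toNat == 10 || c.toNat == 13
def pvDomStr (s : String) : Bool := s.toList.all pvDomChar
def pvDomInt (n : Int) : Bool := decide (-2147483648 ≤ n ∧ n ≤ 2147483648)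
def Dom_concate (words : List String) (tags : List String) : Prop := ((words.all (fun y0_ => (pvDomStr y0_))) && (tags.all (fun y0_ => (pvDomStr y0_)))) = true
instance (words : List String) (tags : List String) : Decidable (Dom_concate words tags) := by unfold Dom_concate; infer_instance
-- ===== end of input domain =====

-- B computes the result as a '%'-join of groups (new group at each 'B' tag) instead of A's
-- index loop with a conditional separator; alternative decomposition, same cost.


-- ===== PORT A =====
def concate (words : List String) (tags : List String) : String :=
  (PySem.List.pyRange 0 (tags.length : Int)).foldl
    (fun s i =>
      (if PySem.List.pyGetD tags i "" = "B" ∧ i ≠ 0 then s ++ "%" else s)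
        ++ PySem.List.pyGetD words i "") ""

-- ===== PORT B =====
def groupsB (words : List String) (tags : List String) : List (List String) :=
  (words.zip tags).foldl
    (fun gs (p : String × String) =>
      if gs.isEmpty || p.2 == "B" then gs ++ [[p.1]]
      else gs.dropLast ++ [(gs.getLast?.getD []) ++ [p.1]]) []

def concate_alt (words : List String) (tags : List String) : String :=
  PySem.Str.join "%" ((groupsB words tags).map (fun g => PySem.Str.join "" g))

-- ===== PRECONDITION & SPEC =====
-- A's assert raises AssertionError when the lists have different lengths; exactly those inputs are excluded.
def Pre_concate (words : List String) (tags : List String) : Prop := words.length = tags.length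
instance (words : List String) (tags : List String) : Decidable (Pre_concate words tags) := by unfold Pre_concate; infer_instance
def pvWitness_concate : List String × List String := (["abc", "de", "f"], ["B", "I", "B"])
def Spec_concate (words : List String) (tags : List String) (out : String) : Prop := out = concate_alt words tags
instance (words : List String) (tags : List String) (out : String) : Decidable (Spec_concate words tags out) := by unfold Spec_concate; infer_instance

-- ===== CLAIM (what is proved, stated in full; the proofs are below) =====
def Claim_equal_concate : Prop := ∀ (words : List String) (tags : List String), Dom_concate words tags → Pre_concate words tags → Spec_concate words tags (concate words tags)

-- ===== LEMMAS AND PROOFS =====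

-- the common char-level shape of both programs' tails (words/tags after position 0)
def restSpec : List String → List String → List Char
  | w :: ws, t :: ts => (if t = "B" then ['%'] else []) ++ w.toList ++ restSpec ws ts
  | _, _ => []

lemma join_append_singleton (sep g : List Char) :
    ∀ gsL : List (List Char), gsL ≠ [] →
      PySem.Chars.join sep (gsL ++ [g]) = PySem.Chars.join sep gsL ++ sep ++ g := by
  intro gsL
  induction gsL with
  | nil => intro h; exact absurd rfl h
  | cons p rest ih =>
    intro _
    cases rest with
    | nil => simp [PySem.Chars.join_cons_cons, PySem.Chars.join_singleton]
    | cons q rest' =>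
      have : PySem.Chars.join sep ((p :: q :: rest') ++ [g])
          = p ++ sep ++ PySem.Chars.join sep ((q :: rest') ++ [g]) := by
        simpa using PySem.Chars.join_cons_cons sep p q (rest' ++ [g])
      rw [this, ih (by simp), PySem.Chars.join_cons_cons]
      simp [List.append_assoc]

lemma join_nil_append (g : List Char) (gsL : List (List Char)) :
    PySem.Chars.join [] (gsL ++ [g]) = PySem.Chars.join [] gsL ++ g := by
  cases gsL with
  | nil => simp [PySem.Chars.join_singleton, PySem.Chars.join_nil]
  | cons p rest =>
    rw [join_append_singleton [] g (p :: rest) (by simp)]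
    simp

-- char-level rendering of B's group list
def renderL (gs : List (List String)) : List Char :=
  PySem.Chars.join ['%'] (gs.map (fun g => (PySem.Str.join "" g).toList))

lemma renderL_push (gs : List (List String)) (w : String) (h : gs ≠ []) :
    renderL (gs ++ [[w]]) = renderL gs ++ '%' :: w.toList := by
  unfold renderL
  rw [List.map_append, List.map_singleton,
    join_append_singleton _ _ _ (by simpa using h)]
  simp [PySem.Str.toList_join, PySem.Chars.join_singleton]

lemma renderL_extend (gs : List (List String)) (w : String) (h : gs ≠ []) :
    renderL (gs.dropLast ++ [(gs.getLast?.getD []) ++ [w]]) = renderL gs ++ w.toList := by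
  obtain ⟨init, l, rfl⟩ : ∃ init l, gs = init ++ [l] := by
    rcases List.eq_nil_or_concat gs with h' | ⟨init, l, h'⟩
    · exact absurd h' h
    · exact ⟨init, l, by simpa using h'⟩
  have hjoin : (PySem.Str.join "" (l ++ [w])).toList
      = (PySem.Str.join "" l).toList ++ w.toList := by
    rw [PySem.Str.toList_join, PySem.Str.toList_join, List.map_append, List.map_singleton]
    exact join_nil_append _ _
  have hd : (init ++ [l]).dropLast = init := by simp
  have hl : (init ++ [l]).getLast?.getD [] = l := by simp
  rw [hd, hl]
  unfold renderL
  rw [List.map_append, List.map_append, List.map_singleton, List.map_singleton, hjoin]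
  cases init with
  | nil => simp [PySem.Chars.join_singleton]
  | cons a as =>
    rw [join_append_singleton _ _ _ (by simp), join_append_singleton _ _ _ (by simp)]
    simp [List.append_assoc]

-- B's fold peels restSpec from a nonempty group accumulator
lemma B_fold :
    ∀ (ws ts : List String) (gs : List (List String)),
      ws.length = ts.length → gs ≠ [] →
      renderL ((ws.zip ts).foldl
        (fun gs (p : String × String) =>
          if gs.isEmpty || p.2 == "B" then gs ++ [[p.1]]
          else gs.dropLast ++ [(gs.getLast?.getD []) ++ [p.1]]) gs)
        = renderL gs ++ restSpec ws ts := by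
  intro ws
  induction ws with
  | nil => intro ts gs _ _; simp [restSpec]
  | cons w ws ih =>
    intro ts gs hlen hne
    cases ts with
    | nil => simp at hlen
    | cons t ts =>
      have hiE : gs.isEmpty = false := by simpa [List.isEmpty_iff] using hne
      by_cases hB : t = "B"
      · have : ((w, t).2 == "B") = true := by simp [hB]
        simp only [List.zip_cons_cons, List.foldl_cons, hiE, this, Bool.false_or,
          if_true]
        rw [ih ts (gs ++ [[w]]) (by simpa using hlen) (by simp),
          renderL_push gs w hne]
        simp [restSpec, hB, List.append_assoc]
      · have : ((w, t).2 == "B") = false := by simp [hB]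
        simp only [List.zip_cons_cons, List.foldl_cons, hiE, this, Bool.false_or,
          Bool.false_eq_true, if_false]
        rw [ih ts _ (by simpa using hlen) (by simp),
          renderL_extend gs w hne]
        simp [restSpec, hB, List.append_assoc]

-- A's fold from index k ≥ 1 computes restSpec of the dropped suffixes
lemma A_fold (words tags : List String) (hlen : words.length = tags.length) :
    ∀ (n k : Nat) (s : String), 1 ≤ k → tags.length - k = n →
      ((PySem.List.pyRange (k : Int) (tags.length : Int)).foldl
        (fun s i =>
          (if PySem.List.pyGetD tags i "" = "B" ∧ i ≠ 0 then s ++ "%" else s)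
            ++ PySem.List.pyGetD words i "") s).toList
        = s.toList ++ restSpec (words.drop k) (tags.drop k) := by
  intro n
  induction n with
  | zero =>
    intro k s _ hk
    have hge : tags.length ≤ k := by omega
    rw [PySem.List.pyRange_one_eq_nil (by exact_mod_cast hge)]
    simp [List.drop_eq_nil_of_le hge, restSpec]
  | succ m ih =>
    intro k s hk1 hkn
    have hklt : k < tags.length := by omega
    have hkw : k < words.length := by omega
    rw [PySem.List.pyRange_one_cons (by exact_mod_cast hklt), List.foldl_cons]
    have e1 : PySem.List.pyGetD tags (k : Int) "" = tags[k] := by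
      rw [PySem.List.pyGetD_eq_getElem tags "" (by positivity) (by exact_mod_cast hklt)]
      simp
    have e2 : PySem.List.pyGetD words (k : Int) "" = words[k]'hkw := by
      rw [PySem.List.pyGetD_eq_getElem words "" (by positivity) (by exact_mod_cast hkw)]
      simp
    have hk0' : k ≠ 0 := by omega
    have hkk : ((k : Int) + 1) = ((k + 1 : Nat) : Int) := by push_cast; ring
    rw [hkk, ih (k + 1) _ (by omega) (by omega)]
    rw [List.drop_eq_getElem_cons hklt, List.drop_eq_getElem_cons hkw]
    simp only [restSpec, e1, e2]
    by_cases hB : tags[k] = "B" <;>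
      simp [hB, hk0', String.toList_append, List.append_assoc]

-- ===== VERDICT (by name: the statement is the Claim_ definition above) =====
theorem concate_spec : Claim_equal_concate := by
  intro words tags _ hpre
  unfold Spec_concate Pre_concate at *
  rw [← String.toList_inj]
  have hBside : (concate_alt words tags).toList = renderL (groupsB words tags) := by
    unfold concate_alt renderL
    rw [PySem.Str.toList_join, List.map_map]
    rfl
  rw [hBside]
  unfold concate groupsB
  cases words with
  | nil =>
    cases tags with
    | cons t ts => simp at hpre
    | nil => simp [PySem.List.pyRange_one_eq_nil, renderL, PySem.Chars.join_nil]
  | cons w ws =>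
    cases tags with
    | nil => simp at hpre
    | cons t ts =>
      -- B side: the first word always opens a fresh group
      rw [List.zip_cons_cons, List.foldl_cons]
      simp only [List.isEmpty_nil, Bool.true_or, if_true, List.nil_append]
      rw [B_fold ws ts [[w]] (by simpa using hpre) (by simp)]
      have hr1 : renderL [[w]] = w.toList := by
        simp [renderL, PySem.Chars.join_singleton, PySem.Str.toList_join,
          PySem.Chars.join_singleton]
      rw [hr1]
      -- A side: peel index 0 (no '%' there), then A_fold from index 1
      rw [show (0 : Int) = ((0 : Nat) : Int) from rfl,
        PySem.List.pyRange_one_cons (by exact_mod_cast Nat.succ_pos ts.length)]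
      rw [List.foldl_cons]
      have e2 : PySem.List.pyGetD (w :: ws) ((0 : Nat) : Int) "" = w := by
        rw [PySem.List.pyGetD_eq_getElem _ "" (by simp) (by simp)]; simp
      simp only [Int.natCast_zero, ne_eq, not_true_eq_false, and_false, if_false,
        show ((0 : Int) + 1) = ((1 : Nat) : Int) by simp]
      rw [A_fold (w :: ws) (t :: ts) hpre ((t :: ts).length - 1) 1 _ (by omega) rfl]
      simp
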